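-- pv_equiv track=rewrite | github.com/DiabloCC/learning | codewars/kata6_sum35.py | sums1
-- ===== SOURCE A (Python) =====
-- def sums1(n):
-- 	r = 0
-- 	s = []
-- 	for i in range(1, (n+2)//3):
-- 		if (i*5<n):
-- 			if (i%5==0):
-- 				r += 5*i
-- 				s += [5*i]
-- 			elif (i%5==0):
-- 				r += 3*i
-- 				s += [3*i]
-- 			else:
-- 				r += 8*i
-- 				s += [3*i, 5*i]
-- 		elif i%5 != 0:
-- 			r += 3 * i
-- 			s += [3*i]
-- 	s.sort()
-- 	s.append(r)
-- 	return s
-- ===== SOURCE B (Python) =====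
-- def sums1(n):
--     s = [k for k in range(1, n) if k % 3 == 0 or k % 5 == 0]
--     s.append(sum(s))
--     return s
-- ===== Notes on version B (the rewrite author's own statement) =====
-- stated objective: simpler
-- what changed: B generates the multiples of three or five below n in one ascending divisibility-filtered pass over the whole range and appends the running total, replacing A's per-index emission of both multiples, its duplicate handling for common multiples, and the final sort.
import Mathlib
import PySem

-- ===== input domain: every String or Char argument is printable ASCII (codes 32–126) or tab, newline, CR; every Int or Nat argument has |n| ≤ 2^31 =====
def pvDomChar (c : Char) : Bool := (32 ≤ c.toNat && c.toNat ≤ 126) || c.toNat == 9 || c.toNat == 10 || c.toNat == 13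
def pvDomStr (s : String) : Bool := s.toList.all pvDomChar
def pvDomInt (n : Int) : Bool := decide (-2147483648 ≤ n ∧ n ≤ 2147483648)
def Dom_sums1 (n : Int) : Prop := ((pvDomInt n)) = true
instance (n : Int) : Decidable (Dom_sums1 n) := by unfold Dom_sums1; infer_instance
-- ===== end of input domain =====

-- B builds the multiples of 3 or 5 below n in one ascending divisibility-filtered pass, so no
-- case analysis, no duplicate handling and no sort are needed (objective: simpler).

-- ===== PORT A =====
-- one iteration of A's loop body on the state (r, s)
def sums1Step (n : Int) (rs : Int × List Int) (i : Int) : Int × List Int :=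
  if 5 * i < n then
    if PySem.Int.mod i 5 = 0 then (rs.1 + 5 * i, rs.2 ++ [5 * i])
    else if PySem.Int.mod i 5 = 0 then (rs.1 + 3 * i, rs.2 ++ [3 * i])
    else (rs.1 + 8 * i, rs.2 ++ [3 * i, 5 * i])
  else if PySem.Int.mod i 5 ≠ 0 then (rs.1 + 3 * i, rs.2 ++ [3 * i])
  else rs

def sums1 (n : Int) : List Int :=
  let rs := (PySem.List.pyRange 1 (PySem.Int.floordiv (n + 2) 3) 1).foldl (sums1Step n) (0, [])
  PySem.List.sorted rs.2 (fun x => x) false ++ [rs.1]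

-- ===== PORT B =====
def sums1_alt (n : Int) : List Int :=
  let s := (PySem.List.pyRange 1 n 1).filter
    (fun k => PySem.Int.mod k 3 == 0 || PySem.Int.mod k 5 == 0)
  s ++ [s.sum]

-- ===== PRECONDITION & SPEC =====
def Spec_sums1 (n : Int) (out : List Int) : Prop := out = sums1_alt n
instance (n : Int) (out : List Int) : Decidable (Spec_sums1 n out) := by unfold Spec_sums1; infer_instance

-- ===== CLAIM (what is proved, stated in full; the proofs are below) =====
def Claim_equal_sums1 : Prop := ∀ (n : Int), Dom_sums1 n → Spec_sums1 n (sums1 n)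

-- ===== LEMMAS AND PROOFS =====

-- the list A's loop appends for index i
def sums1Chunk (n i : Int) : List Int :=
  if 5 * i < n then
    if PySem.Int.mod i 5 = 0 then [5 * i] else [3 * i, 5 * i]
  else if PySem.Int.mod i 5 ≠ 0 then [3 * i] else []

lemma sums1Step_eq (n : Int) (rs : Int × List Int) (i : Int) :
    sums1Step n rs i = (rs.1 + (sums1Chunk n i).sum, rs.2 ++ sums1Chunk n i) := by
  unfold sums1Step sums1Chunk
  split_ifs with h1 h2 h3 <;> simp
  ring

lemma sums1_foldl (n : Int) (l : List Int) (rs : Int × List Int) :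
    l.foldl (sums1Step n) rs = (rs.1 + (l.flatMap (sums1Chunk n)).sum, rs.2 ++ l.flatMap (sums1Chunk n)) := by
  induction l generalizing rs with
  | nil => simp
  | cons x t ih => simp [ih, sums1Step_eq]; ring

lemma mem_sums1Chunk {n i x : Int} :
    x ∈ sums1Chunk n i ↔ (x = 5 * i ∧ 5 * i < n) ∨ (x = 3 * i ∧ ¬ 5 ∣ i) := by
  have hd : (PySem.Int.mod i 5 = 0) ↔ (5 ∣ i) := PySem.Int.mod_eq_zero_iff_dvd i 5
  unfold sums1Chunk
  by_cases h5 : (5:Int) ∣ i <;>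
    simp only [ne_eq, hd] <;>
    split_ifs <;> simp <;> omega

-- the filter predicate of B, as a Prop
lemma filter_pred (k : Int) :
    (PySem.Int.mod k 3 == 0 || PySem.Int.mod k 5 == 0) = true ↔ (3 ∣ k ∨ 5 ∣ k) := by
  simp only [Bool.or_eq_true, beq_iff_eq, PySem.Int.mod_eq_zero_iff_dvd]

lemma lt_bound_iff (n i : Int) : i < PySem.Int.floordiv (n + 2) 3 ↔ 3 * i ≤ n - 1 := by
  constructor
  · intro h
    have := (PySem.Int.le_floordiv_iff_mul_le (a := n + 2) (b := 3) (q := i + 1) (by omega)).mp (by omega)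
    omega
  · intro h
    have := (PySem.Int.le_floordiv_iff_mul_le (a := n + 2) (b := 3) (q := i + 1) (by omega)).mpr (by omega)
    omega

lemma mem_flatMap_chunk (n x : Int) :
    x ∈ (PySem.List.pyRange 1 (PySem.Int.floordiv (n + 2) 3) 1).flatMap (sums1Chunk n) ↔
      (1 ≤ x ∧ x < n ∧ (3 ∣ x ∨ 5 ∣ x)) := by
  rw [List.mem_flatMap]
  constructor
  · rintro ⟨i, hi, hx⟩
    rw [PySem.List.mem_pyRange_one] at hi
    rw [lt_bound_iff] at hi
    rcases mem_sums1Chunk.mp hx with ⟨rfl, h⟩ | ⟨rfl, h5⟩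
    · exact ⟨by omega, by omega, Or.inr ⟨i, by ring⟩⟩
    · exact ⟨by omega, by omega, Or.inl ⟨i, by ring⟩⟩
  · rintro ⟨h1, h2, h3⟩
    by_cases h5 : 5 ∣ x
    · obtain ⟨i, rfl⟩ := h5
      refine ⟨i, ?_, ?_⟩
      · rw [PySem.List.mem_pyRange_one, lt_bound_iff]; omega
      · exact mem_sums1Chunk.mpr (Or.inl ⟨by ring, by omega⟩)
    · rcases h3 with ⟨i, rfl⟩ | h'
      · refine ⟨i, ?_, ?_⟩
        · rw [PySem.List.mem_pyRange_one, lt_bound_iff]; omega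
        · refine mem_sums1Chunk.mpr (Or.inr ⟨by ring, ?_⟩)
          rintro ⟨c, rfl⟩
          exact h5 ⟨3 * c, by ring⟩
      · exact absurd h' h5

lemma nodup_chunk (n i : Int) : (sums1Chunk n i).Nodup := by
  have hd : (PySem.Int.mod i 5 = 0) ↔ (5 ∣ i) := PySem.Int.mod_eq_zero_iff_dvd i 5
  unfold sums1Chunk
  split_ifs with h1 h2 h3 <;> simp
  · rw [hd] at h2
    rintro rfl
    exact h2 ⟨0, by ring⟩

lemma disjoint_chunk {n i j : Int} (hij : i ≠ j) :
    (sums1Chunk n i).Disjoint (sums1Chunk n j) := by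
  intro x hxi hxj
  rcases mem_sums1Chunk.mp hxi with ⟨h1, _⟩ | ⟨h1, h1'⟩ <;>
    rcases mem_sums1Chunk.mp hxj with ⟨h2, _⟩ | ⟨h2, h2'⟩
  · omega
  · exact h2' ⟨i - 2 * j, by omega⟩
  · exact h1' ⟨j - 2 * i, by omega⟩
  · omega

lemma pairwise_disjoint_chunk (n : Int) :
    ∀ l : List Int, l.Pairwise (· < ·) →
      l.Pairwise (Function.onFun List.Disjoint (sums1Chunk n))
  | [], _ => List.Pairwise.nil
  | a :: t, hp => by
    rw [List.pairwise_cons] at hp ⊢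
    exact ⟨fun j hj => disjoint_chunk (by have := hp.1 j hj; omega),
      pairwise_disjoint_chunk n t hp.2⟩

lemma nodup_flatMap_chunk (n : Int) :
    ((PySem.List.pyRange 1 (PySem.Int.floordiv (n + 2) 3) 1).flatMap (sums1Chunk n)).Nodup := by
  rw [List.nodup_flatMap]
  refine ⟨fun i _ => nodup_chunk n i, ?_⟩
  exact pairwise_disjoint_chunk n _ (PySem.List.pairwise_lt_pyRange_one _ _)

lemma filter_nodup (n : Int) :
    ((PySem.List.pyRange 1 n 1).filter
      (fun k => PySem.Int.mod k 3 == 0 || PySem.Int.mod k 5 == 0)).Nodup :=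
  (PySem.List.nodup_pyRange_one 1 n).filter _

lemma filter_pairwise (n : Int) :
    ((PySem.List.pyRange 1 n 1).filter
      (fun k => PySem.Int.mod k 3 == 0 || PySem.Int.mod k 5 == 0)).Pairwise (· < ·) :=
  (PySem.List.pairwise_lt_pyRange_one 1 n).filter _

lemma mem_filter_iff (n x : Int) :
    x ∈ (PySem.List.pyRange 1 n 1).filter
        (fun k => PySem.Int.mod k 3 == 0 || PySem.Int.mod k 5 == 0) ↔
      (1 ≤ x ∧ x < n ∧ (3 ∣ x ∨ 5 ∣ x)) := by
  rw [List.mem_filter, PySem.List.mem_pyRange_one, filter_pred]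
  tauto

lemma perm_main (n : Int) :
    ((PySem.List.pyRange 1 n 1).filter
      (fun k => PySem.Int.mod k 3 == 0 || PySem.Int.mod k 5 == 0)).Perm
    ((PySem.List.pyRange 1 (PySem.Int.floordiv (n + 2) 3) 1).flatMap (sums1Chunk n)) := by
  rw [List.perm_ext_iff_of_nodup (filter_nodup n) (nodup_flatMap_chunk n)]
  intro x
  rw [mem_filter_iff, mem_flatMap_chunk]

-- ===== VERDICT (by name: the statement is the Claim_ definition above) =====
theorem sums1_spec : Claim_equal_sums1 := by
  intro n _
  unfold Spec_sums1 sums1 sums1_alt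
  rw [sums1_foldl]
  have h1 := PySem.List.sorted_eq_of_perm_of_pairwise_lt _ _ (fun x : Int => x)
    (perm_main n) (filter_pairwise n)
  simp only [List.nil_append, zero_add, h1, (perm_main n).sum_eq]
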